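-- pv_equiv track=rewrite | github.com/bkane2/eta | core/resources/detect-open-ended-question.py | assign_word_features
-- ===== SOURCE A (Python) =====
-- def assign_word_features(d):
--   """Given a dict mapping word features to words, create a dict
--      mapping any particular word to its word features."""
--   feat_dict = dict()
--   for f, ws in d.items():
--     ws = get_base_words(ws, d) + [f]
--     for w in ws:
--       if w not in feat_dict:
--         feat_dict[w] = []
--       feat_dict[w] += [f]
--   return feat_dict
--
-- def get_base_words(ws, d):
--   """Given a list of words or features, reduce to a list of
--      base words by expanding features."""
--   ret = []
--   for w in ws:
--     if w in d:
--       ret += get_base_words(d[w], d) + [w]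
--     else:
--       ret += [w]
--   return ret
-- ===== SOURCE B (Python) =====
-- def assign_word_features(d):
--   """Given a dict mapping word features to words, create a dict
--      mapping any particular word to its word features.
--      The expansion of each feature key is computed once and memoized
--      (DP over the feature DAG) instead of being re-expanded at every
--      occurrence."""
--   memo = {}
--   def expand(f):
--     # expansion of a feature key f, computed once (DP over the feature DAG)
--     out = memo.get(f)
--     if out is None:
--       out = []
--       for x in d[f]:
--         if x in d:
--           out += expand(x)
--         else:
--           out.append(x)
--       out.append(f)
--       memo[f] = out
--     return out
--   feat_dict = {}
--   for f in d:
--     for w in expand(f):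
--       feat_dict.setdefault(w, []).append(f)
--   return feat_dict
-- ===== Notes on version B (the rewrite author's own statement) =====
-- stated objective: faster
-- what changed: B memoizes the expansion of each feature key in a dict (each key's base-word list is computed once, DP over the feature DAG) instead of A's get_base_words re-expanding every nested feature at every occurrence.
import Mathlib
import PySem

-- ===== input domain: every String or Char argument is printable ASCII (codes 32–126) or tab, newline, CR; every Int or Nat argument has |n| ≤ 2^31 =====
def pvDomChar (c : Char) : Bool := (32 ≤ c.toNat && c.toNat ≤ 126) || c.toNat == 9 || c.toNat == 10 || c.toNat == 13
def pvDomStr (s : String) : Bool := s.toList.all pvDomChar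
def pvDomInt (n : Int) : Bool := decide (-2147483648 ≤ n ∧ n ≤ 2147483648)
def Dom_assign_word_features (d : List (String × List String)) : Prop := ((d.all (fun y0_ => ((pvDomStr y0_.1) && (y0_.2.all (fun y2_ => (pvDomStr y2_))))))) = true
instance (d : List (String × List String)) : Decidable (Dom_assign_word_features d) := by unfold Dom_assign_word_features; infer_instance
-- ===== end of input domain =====

-- B memoizes the expansion of each feature key (computed once, DP over the feature
-- DAG) instead of A's re-expansion of every feature at every occurrence.

-- ===== PORT A =====
-- get_base_words(ws, d): literal transliteration; the Nat fuel only makes the Python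
-- recursion structurally total in Lean — fuel (size+1) is never exhausted on the
-- acyclic inputs Pre_ admits (on cyclic inputs Python raises RecursionError).
def gbwA (dd : PySem.Dict String (List String)) : Nat → List String → List String
  | 0, _ => []
  | fu+1, ws => ws.foldl (fun ret w =>
      if dd.contains w then ret ++ (gbwA dd fu (dd.getD w []) ++ [w])
      else ret ++ [w]) []

def assign_word_features (d : List (String × List String)) : List (String × List String) :=
  let dd := PySem.Dict.ofList d
  let fd := dd.items.foldl (fun fd p =>
      let ws := gbwA dd (dd.size + 1) p.2 ++ [p.1]
      ws.foldl (fun fd w =>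
        let fd := if fd.contains w then fd else fd.insert w ([] : List String)
        fd.modify w [] (fun l => l ++ [p.1])) fd)
    (PySem.Dict.empty)
  fd.items

-- ===== PORT B =====
-- expand(w) with the memo dict threaded through; same fuel device as in port A.
def expandB (dd : PySem.Dict String (List String)) :
    Nat → PySem.Dict String (List String) → String →
    List String × PySem.Dict String (List String)
  | 0, memo, _ => ([], memo)
  | fu+1, memo, f =>
    match memo.get? f with
    | some out => (out, memo)
    | none =>
      let r := (dd.getD f []).foldl (fun acc x =>
          if dd.contains x then
            let p := expandB dd fu acc.2 x
            (acc.1 ++ p.1, p.2)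
          else (acc.1 ++ [x], acc.2)) (([] : List String), memo)
      let out := r.1 ++ [f]
      (out, r.2.insert f out)

def assign_word_features_alt (d : List (String × List String)) : List (String × List String) :=
  let dd := PySem.Dict.ofList d
  let r := dd.keys.foldl (fun acc f =>
      let p := expandB dd (dd.size + 1) acc.2 f
      -- feat_dict.setdefault(w, []).append(f)  ==  modify w [] (· ++ [f]) after setdefault
      (p.1.foldl (fun fd w => (fd.setdefault w []).modify w [] (fun l => l ++ [f])) acc.1, p.2))
    ((PySem.Dict.empty : PySem.Dict String (List String)),
     (PySem.Dict.empty : PySem.Dict String (List String)))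
  r.1.items

-- ===== PRECONDITION & SPEC =====
-- the feature-reference graph of d: keys directly mentioned in a key's word list
def succsR (dd : PySem.Dict String (List String)) (w : String) : Finset String :=
  ((dd.getD w []).filter (fun x => dd.contains x)).toFinset
def stepR (dd : PySem.Dict String (List String)) (S : Finset String) : Finset String :=
  S ∪ S.biUnion (succsR dd)
def reachR (dd : PySem.Dict String (List String)) (w : String) : Finset String :=
  (stepR dd)^[dd.size] (succsR dd w)
-- Pre_ excludes exactly the dicts whose feature references form a cycle (a key that
-- reaches itself through the reference graph): on those A's recursion never
-- terminates and Python raises RecursionError.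
def Pre_assign_word_features (d : List (String × List String)) : Prop :=
  ∀ f ∈ (PySem.Dict.ofList d).keys, f ∉ reachR (PySem.Dict.ofList d) f
instance (d : List (String × List String)) : Decidable (Pre_assign_word_features d) := by
  unfold Pre_assign_word_features; infer_instance

def pvWitness_assign_word_features : (List (String × List String)) :=
  [("antonym", ["good", "bad"]), ("adj", ["antonym", "big"])]

def Spec_assign_word_features (d : List (String × List String)) (out : List (String × List String)) : Prop := out = assign_word_features_alt d
instance (d : List (String × List String)) (out : List (String × List String)) : Decidable (Spec_assign_word_features d out) := by unfold Spec_assign_word_features; infer_instance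

-- ===== CLAIM (what is proved, stated in full; the proofs are below) =====
def Claim_equal_assign_word_features : Prop := ∀ (d : List (String × List String)), Dom_assign_word_features d → Pre_assign_word_features d → Spec_assign_word_features d (assign_word_features d)


-- ===== LEMMAS AND PROOFS =====

-- canonical expansion of a single word (A's value for it, at the canonical fuel)
def VALd (dd : PySem.Dict String (List String)) (w : String) : List String :=
  if dd.contains w then gbwA dd (dd.size + 1) (dd.getD w []) ++ [w] else [w]

-- every memo entry is a key mapped to its canonical expansion
def GoodMemo (dd memo : PySem.Dict String (List String)) : Prop :=
  ∀ k l, memo.get? k = some l → dd.contains k = true ∧ l = VALd dd k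

-- fuel F is enough to expand every word of ws
def OkFuel (dd : PySem.Dict String (List String)) (F : Nat) (ws : List String) : Prop :=
  1 ≤ F ∧ ∀ w ∈ ws, dd.contains w = true → (reachR dd w).card + 2 ≤ F

theorem keys_length_eq_size (dd : PySem.Dict String (List String)) :
    dd.keys.length = dd.size := by
  have h : dd.keys = dd.items.map (·.1) := rfl
  rw [h, List.length_map]
  rfl

theorem mem_succsR (dd : PySem.Dict String (List String)) (w x : String) :
    x ∈ succsR dd w ↔ x ∈ dd.getD w [] ∧ dd.contains x = true := by
  simp [succsR]

theorem succsR_subset_keys (dd : PySem.Dict String (List String)) (w : String) :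
    succsR dd w ⊆ dd.keys.toFinset := by
  intro x hx
  rw [List.mem_toFinset, ← PySem.Dict.contains_iff_mem_keys]
  exact ((mem_succsR dd w x).1 hx).2

theorem subset_stepR (dd : PySem.Dict String (List String)) (S : Finset String) :
    S ⊆ stepR dd S := Finset.subset_union_left

theorem stepR_mono (dd : PySem.Dict String (List String)) {S T : Finset String}
    (h : S ⊆ T) : stepR dd S ⊆ stepR dd T :=
  Finset.union_subset_union h (Finset.biUnion_subset_biUnion_of_subset_left _ h)

theorem stepR_subset_keys (dd : PySem.Dict String (List String)) {S : Finset String}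
    (h : S ⊆ dd.keys.toFinset) : stepR dd S ⊆ dd.keys.toFinset := by
  apply Finset.union_subset h
  apply Finset.biUnion_subset.2
  intro x _
  exact succsR_subset_keys dd x

theorem iterate_stepR_subset_keys (dd : PySem.Dict String (List String)) {S : Finset String}
    (h : S ⊆ dd.keys.toFinset) (k : Nat) : (stepR dd)^[k] S ⊆ dd.keys.toFinset := by
  induction k generalizing S with
  | zero => exact h
  | succ k ih =>
    rw [Function.iterate_succ_apply]
    exact ih (stepR_subset_keys dd h)

theorem subset_iterate_stepR (dd : PySem.Dict String (List String)) (S : Finset String)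
    (k : Nat) : S ⊆ (stepR dd)^[k] S := by
  induction k with
  | zero => simp
  | succ k ih =>
    rw [Function.iterate_succ_apply']
    exact ih.trans (subset_stepR dd _)

theorem stepR_empty (dd : PySem.Dict String (List String)) : stepR dd ∅ = ∅ := by
  simp [stepR]

theorem iterate_fixed_of_fixed {f : Finset String → Finset String} {S : Finset String}
    {k : Nat} (h : f ((f)^[k] S) = (f)^[k] S) (m : Nat) : (f)^[k + m] S = (f)^[k] S := by
  induction m with
  | zero => rfl
  | succ m ih =>
    have : k + (m + 1) = (k + m) + 1 := by omega
    rw [this, Function.iterate_succ_apply', ih, h]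

theorem card_grow_of_strict {f : Finset String → Finset String}
    (hinfl : ∀ T, T ⊆ f T) {S : Finset String} {m : Nat}
    (h : ∀ k < m, (f)^[k] S ≠ (f)^[k + 1] S) : S.card + m ≤ ((f)^[m] S).card := by
  induction m with
  | zero => simp
  | succ m ih =>
    have h1 : S.card + m ≤ ((f)^[m] S).card := ih (fun k hk => h k (by omega))
    have h2 : ((f)^[m] S) ⊂ ((f)^[m + 1] S) := by
      constructor
      · rw [Function.iterate_succ_apply']
        exact hinfl _
      · intro hsub
        exact h m (by omega) (Finset.Subset.antisymm (by
          rw [Function.iterate_succ_apply']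
          exact hinfl _) hsub)
    have := Finset.card_lt_card h2
    omega

theorem reachR_fixpoint (dd : PySem.Dict String (List String)) (w : String) :
    stepR dd (reachR dd w) = reachR dd w := by
  have hS0 : succsR dd w ⊆ dd.keys.toFinset := succsR_subset_keys dd w
  have hkcard : dd.keys.toFinset.card ≤ dd.size := by
    rw [← keys_length_eq_size dd]
    exact List.toFinset_card_le _
  by_cases hex : ∃ k, k < dd.size ∧ (stepR dd)^[k] (succsR dd w) = (stepR dd)^[k + 1] (succsR dd w)
  · obtain ⟨k, hk, heq⟩ := hex
    have hfix : stepR dd ((stepR dd)^[k] (succsR dd w)) = (stepR dd)^[k] (succsR dd w) := by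
      rw [← Function.iterate_succ_apply' (stepR dd) k]
      exact heq.symm
    have h1 : reachR dd w = (stepR dd)^[k] (succsR dd w) := by
      have : dd.size = k + (dd.size - k) := by omega
      rw [reachR, this]
      exact iterate_fixed_of_fixed hfix _
    rw [h1, hfix]
  · push_neg at hex
    have hgrow := card_grow_of_strict (subset_stepR dd) (S := succsR dd w) (m := dd.size)
      (fun k hk => hex k hk)
    have hle : ((stepR dd)^[dd.size] (succsR dd w)).card ≤ dd.size :=
      le_trans (Finset.card_le_card (iterate_stepR_subset_keys dd hS0 _)) hkcard
    have hcard0 : (succsR dd w).card = 0 := by omega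
    have hS0e : succsR dd w = ∅ := Finset.card_eq_zero.1 hcard0
    by_cases hn : dd.size = 0
    · rw [reachR, hn, hS0e]
      simp [stepR_empty]
    · exfalso
      apply hex 0 (by omega)
      simp [hS0e, stepR_empty]

theorem succsR_subset_reachR (dd : PySem.Dict String (List String)) (w : String) :
    succsR dd w ⊆ reachR dd w := subset_iterate_stepR dd _ _

theorem reachR_closed (dd : PySem.Dict String (List String)) {w x : String}
    (hx : x ∈ reachR dd w) : reachR dd x ⊆ reachR dd w := by
  have hsucc : succsR dd x ⊆ reachR dd w := by
    intro y hy
    have : y ∈ stepR dd (reachR dd w) := by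
      apply Finset.mem_union_right
      exact Finset.mem_biUnion.2 ⟨x, hx, hy⟩
    rwa [reachR_fixpoint] at this
  have : ∀ k, (stepR dd)^[k] (succsR dd x) ⊆ reachR dd w := by
    intro k
    induction k with
    | zero => exact hsucc
    | succ k ih =>
      rw [Function.iterate_succ_apply']
      calc stepR dd ((stepR dd)^[k] (succsR dd x)) ⊆ stepR dd (reachR dd w) := stepR_mono dd ih
        _ = reachR dd w := reachR_fixpoint dd w
  exact this _

theorem rank_lt (dd : PySem.Dict String (List String))
    (hacyc : ∀ f ∈ dd.keys, f ∉ reachR dd f) {w x : String}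
    (hx : x ∈ succsR dd w) : (reachR dd x).card < (reachR dd w).card := by
  have hxr : x ∈ reachR dd w := succsR_subset_reachR dd w hx
  have hxk : x ∈ dd.keys := by
    rw [← PySem.Dict.contains_iff_mem_keys]
    exact ((mem_succsR dd w x).1 hx).2
  have hsub : reachR dd x ⊆ reachR dd w := reachR_closed dd hxr
  apply Finset.card_lt_card
  rw [Finset.ssubset_def]
  refine ⟨hsub, fun hsup => ?_⟩
  exact hacyc x hxk (hsup hxr)

theorem okfuel_top (dd : PySem.Dict String (List String))
    (hacyc : ∀ f ∈ dd.keys, f ∉ reachR dd f) (hnd : dd.keys.Nodup)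
    (ws : List String) : OkFuel dd (dd.size + 1) ws := by
  refine ⟨by omega, fun w _ hw => ?_⟩
  have hwk : w ∈ dd.keys := (PySem.Dict.contains_iff_mem_keys dd w).1 hw
  have hwe : reachR dd w ⊆ dd.keys.toFinset.erase w := by
    intro y hy
    rw [Finset.mem_erase]
    refine ⟨fun hyw => hacyc w hwk (hyw ▸ hy), ?_⟩
    exact iterate_stepR_subset_keys dd (succsR_subset_keys dd w) _ hy
  have h1 : (reachR dd w).card ≤ (dd.keys.toFinset.erase w).card := Finset.card_le_card hwe
  have h2 : (dd.keys.toFinset.erase w).card = dd.keys.toFinset.card - 1 :=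
    Finset.card_erase_of_mem (List.mem_toFinset.2 hwk)
  have h3 : dd.keys.toFinset.card = dd.size := by
    rw [List.toFinset_card_of_nodup hnd, keys_length_eq_size dd]
  have h4 : 1 ≤ dd.size := by
    have : dd.keys ≠ [] := by
      intro h
      rw [h] at hwk
      simp at hwk
    have : 0 < dd.keys.length := List.length_pos_iff.2 this
    have hsz : dd.keys.length = dd.size := keys_length_eq_size dd
    omega
  omega

theorem flatMap_congr_mem {α β : Type} {l : List α} {f g : α → List β}
    (h : ∀ x ∈ l, f x = g x) : l.flatMap f = l.flatMap g := by
  induction l with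
  | nil => rfl
  | cons a l ih =>
    simp only [List.flatMap_cons]
    rw [h a (by simp), ih (fun x hx => h x (by simp [hx]))]

theorem gbwA_unfold (dd : PySem.Dict String (List String)) (fu : Nat) (ws : List String) :
    gbwA dd (fu + 1) ws
      = ws.flatMap (fun w => if dd.contains w then gbwA dd fu (dd.getD w []) ++ [w] else [w]) := by
  have hfn : (fun (ret : List String) w =>
        if dd.contains w then ret ++ (gbwA dd fu (dd.getD w []) ++ [w]) else ret ++ [w])
      = fun (ret : List String) w =>
        ret ++ (if dd.contains w then gbwA dd fu (dd.getD w []) ++ [w] else [w]) := by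
    funext r w
    split <;> rfl
  show ws.foldl _ [] = _
  rw [hfn, PySem.List.foldl_append_eq_flatMap]
  rfl

theorem okfuel_down (dd : PySem.Dict String (List String))
    (hacyc : ∀ f ∈ dd.keys, f ∉ reachR dd f) {F : Nat} {ws : List String}
    (h : OkFuel dd (F + 1) ws) {w : String} (hw : w ∈ ws) (hwk : dd.contains w = true) :
    OkFuel dd F (dd.getD w []) := by
  have hcw := h.2 w hw hwk
  refine ⟨by omega, fun x hx hxk => ?_⟩
  have hxs : x ∈ succsR dd w := (mem_succsR dd w x).2 ⟨hx, hxk⟩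
  have := rank_lt dd hacyc hxs
  omega

theorem gbwA_congr (dd : PySem.Dict String (List String))
    (hacyc : ∀ f ∈ dd.keys, f ∉ reachR dd f) :
    ∀ F F' ws, OkFuel dd F ws → OkFuel dd F' ws → gbwA dd F ws = gbwA dd F' ws := by
  intro F
  induction F using Nat.strong_induction_on with
  | _ F IH =>
    intro F' ws h h'
    obtain ⟨fu, rfl⟩ : ∃ fu, F = fu + 1 := ⟨F - 1, by have := h.1; omega⟩
    obtain ⟨fu', rfl⟩ : ∃ fu', F' = fu' + 1 := ⟨F' - 1, by have := h'.1; omega⟩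
    rw [gbwA_unfold, gbwA_unfold]
    apply flatMap_congr_mem
    intro w hw
    by_cases hwk : dd.contains w = true
    · simp only [hwk, if_true]
      rw [IH fu (by omega) fu' (dd.getD w []) (okfuel_down dd hacyc h hw hwk)
        (okfuel_down dd hacyc h' hw hwk)]
    · simp [hwk]

theorem gbwA_eq_flatMap_VAL (dd : PySem.Dict String (List String))
    (hacyc : ∀ f ∈ dd.keys, f ∉ reachR dd f) (hnd : dd.keys.Nodup) :
    ∀ F ws, OkFuel dd F ws → gbwA dd F ws = ws.flatMap (VALd dd) := by
  intro F ws h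
  obtain ⟨fu, rfl⟩ : ∃ fu, F = fu + 1 := ⟨F - 1, by have := h.1; omega⟩
  rw [gbwA_unfold]
  apply flatMap_congr_mem
  intro w hw
  by_cases hwk : dd.contains w = true
  · simp only [hwk, if_true, VALd]
    rw [gbwA_congr dd hacyc fu (dd.size + 1) (dd.getD w []) (okfuel_down dd hacyc h hw hwk)
      (okfuel_top dd hacyc hnd _)]
  · simp [hwk, VALd]

theorem expandB_spec (dd : PySem.Dict String (List String))
    (hacyc : ∀ f ∈ dd.keys, f ∉ reachR dd f) (hnd : dd.keys.Nodup) :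
    ∀ F memo w, GoodMemo dd memo → dd.contains w = true →
      (reachR dd w).card + 2 ≤ F →
      (expandB dd F memo w).1 = VALd dd w ∧ GoodMemo dd (expandB dd F memo w).2 := by
  intro F
  induction F using Nat.strong_induction_on with
  | _ F IH =>
    intro memo w hg hwk hw
    obtain ⟨fu, rfl⟩ : ∃ fu, F = fu + 1 := ⟨F - 1, by omega⟩
    cases hmg : memo.get? w with
    | some l =>
      have := hg w l hmg
      simp only [expandB, hmg]
      exact ⟨this.2, hg⟩
    | none =>
      have hfold : ∀ (xs : List String), (∀ x ∈ xs, x ∈ dd.getD w []) →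
          ∀ (acc0 : List String) (m0 : PySem.Dict String (List String)), GoodMemo dd m0 →
          (xs.foldl (fun acc x =>
              if dd.contains x then
                let p := expandB dd fu acc.2 x
                (acc.1 ++ p.1, p.2)
              else (acc.1 ++ [x], acc.2)) (acc0, m0)).1 = acc0 ++ xs.flatMap (VALd dd) ∧
          GoodMemo dd (xs.foldl (fun acc x =>
              if dd.contains x then
                let p := expandB dd fu acc.2 x
                (acc.1 ++ p.1, p.2)
              else (acc.1 ++ [x], acc.2)) (acc0, m0)).2 := by
        intro xs
        induction xs with
        | nil => intro _ acc0 m0 hm0; exact ⟨by simp, hm0⟩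
        | cons x xs ihx =>
          intro hmem acc0 m0 hm0
          by_cases hxk : dd.contains x = true
          · have hxcond : (reachR dd x).card + 2 ≤ fu := by
              have hxs : x ∈ succsR dd w :=
                (mem_succsR dd w x).2 ⟨hmem x (by simp), hxk⟩
              have := rank_lt dd hacyc hxs
              omega
            have hx := IH fu (by omega) m0 x hm0 hxk hxcond
            simp only [List.foldl_cons, hxk, if_true]
            have := ihx (fun y hy => hmem y (by simp [hy])) (acc0 ++ (expandB dd fu m0 x).1)
              (expandB dd fu m0 x).2 hx.2
            refine ⟨?_, this.2⟩
            rw [this.1, hx.1]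
            simp [VALd, hxk]
          · simp only [List.foldl_cons, hxk]
            simp only [Bool.false_eq_true, if_false]
            have := ihx (fun y hy => hmem y (by simp [hy])) (acc0 ++ [x]) m0 hm0
            refine ⟨?_, this.2⟩
            rw [this.1]
            simp [VALd, hxk]
      have hr := hfold (dd.getD w []) (fun x hx => hx) [] memo hg
      have hval : VALd dd w = (dd.getD w []).flatMap (VALd dd) ++ [w] := by
        rw [VALd, if_pos hwk,
          gbwA_eq_flatMap_VAL dd hacyc hnd (dd.size + 1) _ (okfuel_top dd hacyc hnd _)]
      simp only [expandB, hmg]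
      constructor
      · simp only [hr.1, List.nil_append, hval]
      · intro k l hkl
        rw [PySem.Dict.get?_insert] at hkl
        by_cases hkw : k = w
        · rw [if_pos hkw] at hkl
          cases hkl
          subst hkw
          refine ⟨hwk, ?_⟩
          rw [hval, hr.1]
          simp
        · rw [if_neg hkw] at hkl
          exact hr.2 k l hkl

theorem inner_step_eq (f : String) :
    (fun (fd : PySem.Dict String (List String)) w =>
        (fd.setdefault w []).modify w [] (fun s => s ++ [f]))
      = fun (fd : PySem.Dict String (List String)) w =>
        (if fd.contains w then fd else fd.insert w ([] : List String)).modify w []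
          (fun s => s ++ [f]) := by
  funext fd w
  by_cases h : fd.contains w = true
  · rw [PySem.Dict.setdefault_of_contains fd [] h, if_pos h]
  · rw [PySem.Dict.setdefault_of_not_contains fd [] (by simpa using h), if_neg (by simp [h])]

theorem outer_fold (dd : PySem.Dict String (List String))
    (hacyc : ∀ f ∈ dd.keys, f ∉ reachR dd f) (hnd : dd.keys.Nodup) :
    ∀ (l : List (String × List String)), (∀ p ∈ l, p ∈ dd.items) →
    ∀ (fd memo : PySem.Dict String (List String)), GoodMemo dd memo →
    (l.foldl (fun acc p =>
        let q := expandB dd (dd.size + 1) acc.2 p.1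
        (q.1.foldl (fun fd w => (fd.setdefault w []).modify w [] (fun s => s ++ [p.1])) acc.1,
          q.2)) (fd, memo)).1
      = l.foldl (fun fd p =>
          (gbwA dd (dd.size + 1) p.2 ++ [p.1]).foldl (fun fd w =>
            (if fd.contains w then fd else fd.insert w ([] : List String)).modify w []
              (fun s => s ++ [p.1])) fd) fd := by
  intro l
  induction l with
  | nil => intro _ fd memo _; rfl
  | cons p l ih =>
    intro hmem fd memo hg
    have hpk : dd.contains p.1 = true := by
      rw [PySem.Dict.contains_iff_mem_keys]
      exact PySem.Dict.mem_keys_of_mem_items dd (hmem p (by simp))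
    have hex := expandB_spec dd hacyc hnd (dd.size + 1) memo p.1 hg hpk
      ((okfuel_top dd hacyc hnd [p.1]).2 p.1 (by simp) hpk)
    have hgd : dd.getD p.1 [] = p.2 :=
      PySem.Dict.getD_of_mem_items dd (hmem p (by simp)) hnd []
    have hq1 : (expandB dd (dd.size + 1) memo p.1).1 = gbwA dd (dd.size + 1) p.2 ++ [p.1] := by
      rw [hex.1, VALd, if_pos hpk, hgd]
    simp only [List.foldl_cons]
    rw [ih (fun y hy => hmem y (by simp [hy])) _ _ hex.2]
    congr 1
    rw [hq1, inner_step_eq]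

-- ===== VERDICT (by name: the statement is the Claim_ definition above) =====
theorem assign_word_features_spec : Claim_equal_assign_word_features := by
  intro d _ hpre
  have hnd := PySem.Dict.nodup_keys_ofList d
  have hge : GoodMemo (PySem.Dict.ofList d) PySem.Dict.empty := by
    intro k l hkl
    rw [PySem.Dict.get?_empty] at hkl
    cases hkl
  have h := outer_fold (PySem.Dict.ofList d) hpre hnd (PySem.Dict.ofList d).items
    (fun p hp => hp) PySem.Dict.empty PySem.Dict.empty hge
  show (List.foldl
      (fun fd p =>
        List.foldl
          (fun fd w =>
            (if fd.contains w then fd else fd.insert w ([] : List String)).modify w []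
              (fun l => l ++ [p.1]))
          fd (gbwA (PySem.Dict.ofList d) ((PySem.Dict.ofList d).size + 1) p.2 ++ [p.1]))
      PySem.Dict.empty (PySem.Dict.ofList d).items).items
    = (List.foldl
        (fun acc f =>
          (List.foldl (fun fd w => (fd.setdefault w []).modify w [] (fun l => l ++ [f])) acc.1
            (expandB (PySem.Dict.ofList d) ((PySem.Dict.ofList d).size + 1) acc.2 f).1,
           (expandB (PySem.Dict.ofList d) ((PySem.Dict.ofList d).size + 1) acc.2 f).2))
        (PySem.Dict.empty, PySem.Dict.empty)
        ((PySem.Dict.ofList d).items.map (·.1))).1.items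
  rw [List.foldl_map]
  exact (congrArg PySem.Dict.items h).symm
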